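-- pv_equiv track=rewrite | github.com/zjma/codegames | gcj2023/e.py | work
-- ===== SOURCE A (Python) =====
-- from collections import Counter
--
-- def work(arr):
--     n=len(arr)
--     ctr = Counter(arr)
--     if len(ctr)==1:
--         return (n+1)//2
--     i=1
--     while arr[i]==arr[i-1]: i+=1
--     arr = arr[i:]+arr[:i]
--     ans = 0
--     i=1
--     while i<n:
--         if arr[i]==arr[i-1]:
--             ans+=1
--             i+=2
--         else:
--             i+=1
--     return ans
-- ===== SOURCE B (Python) =====
-- from itertools import groupby
--
-- def work(arr):
--     if len(set(arr)) == 1: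
--         return (len(arr) + 1) // 2
--     runs = [len(list(g)) for _, g in groupby(arr)]
--     if arr[0] == arr[-1]:
--         runs[0] += runs.pop()
--     return sum(r // 2 for r in runs)
-- ===== Notes on version B (the rewrite author's own statement) =====
-- stated objective: idiomatic
-- what changed: A rotates the array to a run boundary and then does a greedy index-skipping scan counting adjacent equal pairs; B instead run-length-encodes the array (groupby), merges the first and last runs when the first and last elements are equal to account for circularity, and returns the sum of the halved run lengths.
import Mathlib
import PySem

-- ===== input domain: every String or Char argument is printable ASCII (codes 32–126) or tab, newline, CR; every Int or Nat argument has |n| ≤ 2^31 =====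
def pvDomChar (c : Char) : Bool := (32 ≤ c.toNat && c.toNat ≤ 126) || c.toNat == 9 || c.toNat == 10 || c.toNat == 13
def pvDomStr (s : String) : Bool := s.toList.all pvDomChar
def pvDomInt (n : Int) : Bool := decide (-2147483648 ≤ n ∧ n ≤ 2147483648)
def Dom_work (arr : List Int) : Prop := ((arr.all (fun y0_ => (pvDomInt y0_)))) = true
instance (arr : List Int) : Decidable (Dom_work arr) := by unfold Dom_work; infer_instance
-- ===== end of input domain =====

-- B replaces A's rotate-then-greedy-skip scan by a run-length decomposition (group, merge the
-- circular first/last run, sum half run lengths): simpler/idiomatic, same O(n) cost.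

-- ===== PORT A =====
-- `i=1; while arr[i]==arr[i-1]: i+=1` — structural recursion on the suffix; p = arr[i-1], l = arr[i:].
-- Python raises IndexError when l runs out; that happens only for all-equal arr, already returned before.
def workFindBreak (p : Int) (l : List Int) (i : Nat) : Nat :=
  match l with
  | [] => i
  | x :: xs => if x == p then workFindBreak x xs (i + 1) else i

-- `ans=0; i=1; while i<n: if arr[i]==arr[i-1]: ans+=1; i+=2 else: i+=1` — p = arr[i-1], l = arr[i:].
def workGreedy (p : Int) (l : List Int) : Nat :=
  match l with
  | [] => 0
  | x :: xs =>
    if x == p then 1 + (match xs with | [] => 0 | y :: ys => workGreedy y ys)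
    else workGreedy x xs

def work (arr : List Int) : Int :=
  let n := arr.length
  let ctr := PySem.Dict.counter (κ := Int) arr
  if ctr.size = 1 then PySem.Int.floordiv ((n : Int) + 1) 2
  else
    match arr with
    | [] => 0  -- Python raises IndexError (arr[1]) here; excluded by Pre_work
    | a :: rest =>
      let i := workFindBreak a rest 1
      let arr2 := arr.drop i ++ arr.take i
      match arr2 with
      | [] => 0  -- unreachable: arr2 is a rotation of the nonempty arr
      | b :: brest => (workGreedy b brest : Int)

-- ===== PORT B =====
-- run lengths of groupby: p = current group value, c = its count so far, l = rest of the list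
def workRuns (p : Int) (c : Nat) (l : List Int) : List Nat :=
  match l with
  | [] => [c]
  | x :: xs => if x == p then workRuns p (c + 1) xs else c :: workRuns x 1 xs

def work_alt (arr : List Int) : Int :=
  if (PySem.Set.ofList arr).length = 1 then PySem.Int.floordiv ((arr.length : Int) + 1) 2
  else
    match arr with
    | [] => 0  -- Python raises IndexError (arr[0]) here; excluded by Pre_work
    | a :: rest =>
      let runs := workRuns a 1 rest
      -- `if arr[0]==arr[-1]: runs[0] += runs.pop()` (runs has ≥ 2 entries: arr is not all-equal)
      let runs2 :=
        if a == rest.getLastD a then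
          match runs with
          | [] => []  -- unreachable: workRuns never returns []
          | c :: rs => (c + rs.getLastD 0) :: rs.dropLast
        else runs
      let s : Nat := (runs2.map (fun r => r / 2)).sum
      (s : Int)

-- ===== PRECONDITION & SPEC =====
-- Python A (and B) raise IndexError on the empty list; that is all Pre_ excludes.
def Pre_work (arr : List Int) : Prop := arr ≠ []
instance (arr : List Int) : Decidable (Pre_work arr) := by unfold Pre_work; infer_instance
def pvWitness_work : List Int := [1, 2, 2]

def Spec_work (arr : List Int) (out : Int) : Prop := out = work_alt arr
instance (arr : List Int) (out : Int) : Decidable (Spec_work arr out) := by unfold Spec_work; infer_instance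

-- ===== CLAIM (what is proved, stated in full; the proofs are below) =====
def Claim_equal_work : Prop := ∀ (arr : List Int), Dom_work arr → Pre_work arr → Spec_work arr (work arr)

-- ===== LEMMAS AND PROOFS =====

def skipGreedy (l : List Int) : Nat :=
  match l with
  | [] => 0
  | y :: ys => workGreedy y ys

def sumHalves (l : List Nat) : Nat := (l.map (· / 2)).sum

def bumpLast (k : Nat) : List Nat → List Nat
  | [] => []
  | [c] => [c + k]
  | c :: d :: rest => c :: bumpLast k (d :: rest)

def leadCount (a : Int) : List Int → Nat
  | [] => 0
  | x :: xs => if x = a then leadCount a xs + 1 else 0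

theorem workGreedy_cons (p x : Int) (xs : List Int) :
    workGreedy p (x :: xs) = if x = p then 1 + skipGreedy xs else workGreedy x xs := by
  cases xs <;> simp [workGreedy, skipGreedy, beq_iff_eq]

theorem workRuns_cons (p x : Int) (c : Nat) (xs : List Int) :
    workRuns p c (x :: xs) = if x = p then workRuns p (c + 1) xs else c :: workRuns x 1 xs := by
  simp [workRuns, beq_iff_eq]

theorem workRuns_ne_nil (p : Int) (c : Nat) (l : List Int) : workRuns p c l ≠ [] := by
  induction l generalizing p c with
  | nil => simp [workRuns]
  | cons x xs ih => rw [workRuns_cons]; split_ifs <;> simp [ih]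

theorem sumHalves_cons (c : Nat) (l : List Nat) : sumHalves (c :: l) = c / 2 + sumHalves l := by
  simp [sumHalves]

theorem sumHalves_append (l m : List Nat) : sumHalves (l ++ m) = sumHalves l + sumHalves m := by
  simp [sumHalves]

theorem bumpLast_cons (k c : Nat) (t : List Nat) (h : t ≠ []) :
    bumpLast k (c :: t) = c :: bumpLast k t := by
  cases t with
  | nil => exact absurd rfl h
  | cons d rest => rfl

theorem bumpLast_eq (k : Nat) (l : List Nat) (h : l ≠ []) :
    bumpLast k l = l.dropLast ++ [l.getLastD 0 + k] := by
  induction l with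
  | nil => exact absurd rfl h
  | cons c t ih =>
    cases t with
    | nil => simp [bumpLast]
    | cons d rest =>
      rw [bumpLast_cons k c _ (by simp), ih (by simp)]
      simp

-- greedy + parity accumulator = sum of half run lengths
theorem greedy_runs_aux (l : List Int) :
    (∀ p c, workGreedy p l + c = sumHalves (workRuns p (2 * c + 1) l)) ∧
    (∀ p c, skipGreedy l + (c + 1) = sumHalves (workRuns p (2 * c + 2) l)) := by
  induction l with
  | nil =>
    constructor <;> intro p c <;>
      simp [workGreedy, skipGreedy, workRuns, sumHalves] <;> omega
  | cons x xs ih =>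
    obtain ⟨ih1, ih2⟩ := ih
    constructor
    · intro p c
      rw [workGreedy_cons, workRuns_cons]
      by_cases hx : x = p
      · rw [if_pos hx, if_pos hx]
        have h2 := ih2 p c
        have : 2 * c + 1 + 1 = 2 * c + 2 := by omega
        rw [this]
        omega
      · simp only [if_neg hx]
        rw [sumHalves_cons]
        have h1 := ih1 x 0
        simp at h1
        omega
    · intro p c
      simp only [skipGreedy]
      rw [workRuns_cons]
      by_cases hx : x = p
      · rw [if_pos hx]
        have h1 := ih1 p (c + 1)
        have he : 2 * c + 2 + 1 = 2 * (c + 1) + 1 := by omega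
        rw [he]
        rw [hx]
        omega
      · rw [if_neg hx, sumHalves_cons]
        have h1 := ih1 x 0
        simp at h1
        omega

theorem greedy_runs (p : Int) (l : List Int) :
    workGreedy p l = sumHalves (workRuns p 1 l) := by
  have h := (greedy_runs_aux l).1 p 0
  simpa using h

-- runs of a pure block
theorem runs_replicate (a p : Int) (k c : Nat) (hk : 1 ≤ k) :
    workRuns p c (List.replicate k a) = if a = p then [c + k] else [c, k] := by
  induction k generalizing p c with
  | zero => omega
  | succ k ih =>
    rcases Nat.lt_or_ge k 1 with h1 | h1
    · interval_cases k
      rw [show List.replicate 1 a = [a] from rfl, workRuns_cons]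
      split_ifs <;> simp [workRuns]
    · rw [List.replicate_succ, workRuns_cons]
      by_cases hx : a = p
      · rw [if_pos hx, ih p (c + 1) h1, if_pos hx, if_pos hx]
        have he : c + 1 + k = c + (k + 1) := by omega
        rw [he]
      · rw [if_neg hx, ih a 1 h1, if_pos rfl, if_neg hx]
        have he : (1 : Nat) + k = k + 1 := by omega
        rw [he]

-- runs of (l ++ a-block): merged into the last run iff the last element equals a
theorem runs_append_replicate (a : Int) (k : Nat) (hk : 1 ≤ k) :
    ∀ (l : List Int) (p : Int) (c : Nat),
      workRuns p c (l ++ List.replicate k a) =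
        if l.getLastD p = a then bumpLast k (workRuns p c l)
        else workRuns p c l ++ [k] := by
  intro l
  induction l with
  | nil =>
    intro p c
    simp only [List.nil_append, List.getLastD_nil]
    rw [runs_replicate a p k c hk]
    by_cases h : p = a
    · rw [if_pos h, if_pos h.symm]; simp [workRuns, bumpLast]
    · rw [if_neg h, if_neg (fun hh => h hh.symm)]; simp [workRuns]
  | cons x xs ih =>
    intro p c
    rw [List.cons_append, workRuns_cons, workRuns_cons]
    simp only [List.getLastD_cons]
    by_cases hx : x = p
    · rw [if_pos hx, if_pos hx, ih]
      subst hx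
      rfl
    · rw [if_neg hx, if_neg hx, ih x 1]
      by_cases hl : xs.getLastD x = a
      · rw [if_pos hl, if_pos hl, bumpLast_cons _ _ _ (workRuns_ne_nil x 1 xs)]
      · rw [if_neg hl, if_neg hl, List.cons_append]

-- runs of (a-block ++ q::ys) with q ≠ a
theorem runs_replicate_append (a q : Int) (ys : List Int) (hq : q ≠ a) :
    ∀ (j : Nat) (c : Nat),
      workRuns a c (List.replicate j a ++ (q :: ys)) = (c + j) :: workRuns q 1 ys := by
  intro j
  induction j with
  | zero => intro c; simp [workRuns_cons, if_neg hq]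
  | succ j ih =>
    intro c
    rw [List.replicate_succ, List.cons_append, workRuns_cons, if_pos rfl, ih]
    simp; omega

-- findBreak = 1 + number of leading equal elements
theorem findBreak_eq (l : List Int) : ∀ p i, workFindBreak p l i = i + leadCount p l := by
  induction l with
  | nil => intro p i; simp [workFindBreak, leadCount]
  | cons x xs ih =>
    intro p i
    simp only [workFindBreak, leadCount, beq_iff_eq]
    by_cases hx : x = p
    · rw [if_pos hx, if_pos hx, ih]
      subst hx; omega
    · rw [if_neg hx, if_neg hx]; omega

theorem take_leadCount (a : Int) (l : List Int) :
    l.take (leadCount a l) = List.replicate (leadCount a l) a := by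
  induction l with
  | nil => simp [leadCount]
  | cons x xs ih =>
    simp only [leadCount]
    by_cases hx : x = a
    · rw [if_pos hx, List.take_succ_cons, List.replicate_succ, ih, hx]
    · rw [if_neg hx]; simp

theorem leadCount_lt (a : Int) (l : List Int) (h : ¬ ∀ x ∈ l, x = a) :
    leadCount a l < l.length := by
  induction l with
  | nil => exact absurd (by simp) h
  | cons x xs ih =>
    simp only [leadCount, List.length_cons]
    by_cases hx : x = a
    · rw [if_pos hx]
      have hns : ¬ ∀ y ∈ xs, y = a := by
        intro hall
        apply h
        intro y hy
        rcases List.mem_cons.1 hy with h1 | h1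
        · exact h1 ▸ hx
        · exact hall y h1
      have := ih hns
      omega
    · rw [if_neg hx]; omega

theorem drop_leadCount (a : Int) (l : List Int) (h : leadCount a l < l.length) :
    ∃ q ys, l.drop (leadCount a l) = q :: ys ∧ q ≠ a := by
  induction l with
  | nil => simp at h
  | cons x xs ih =>
    simp only [leadCount] at h ⊢
    by_cases hx : x = a
    · rw [if_pos hx] at h ⊢
      rw [List.drop_succ_cons]
      exact ih (by simp at h; omega)
    · rw [if_neg hx] at h ⊢
      exact ⟨x, xs, rfl, hx⟩

-- "len(set(arr)) == 1" ⟺ all elements equal the head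
theorem setlen_one_iff (a : Int) (rest : List Int) :
    (PySem.Set.ofList (a :: rest)).length = 1 ↔ ∀ x ∈ rest, x = a := by
  rw [List.length_eq_one_iff]
  constructor
  · rintro ⟨y, hy⟩ x hx
    have h1 : a ∈ PySem.Set.ofList (a :: rest) := (PySem.Set.mem_ofList _ _).2 (by simp)
    have h2 : x ∈ PySem.Set.ofList (a :: rest) := (PySem.Set.mem_ofList _ _).2 (by simp [hx])
    rw [hy] at h1 h2
    simp at h1 h2
    rw [h1, h2]
  · intro h
    refine ⟨a, ?_⟩
    have hmem : ∀ x ∈ PySem.Set.ofList (a :: rest), x = a := by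
      intro x hx
      have := (PySem.Set.mem_ofList _ _).1 hx
      rcases List.mem_cons.1 this with h1 | h1
      · exact h1
      · exact h x h1
    have ha : a ∈ PySem.Set.ofList (a :: rest) := (PySem.Set.mem_ofList _ _).2 (by simp)
    have hnd : (PySem.Set.ofList (a :: rest)).Nodup := PySem.Set.nodup_ofList _
    rcases hh : PySem.Set.ofList (a :: rest) with _ | ⟨b, t⟩
    · rw [hh] at ha; simp at ha
    · rw [hh] at hmem hnd
      have hb : b = a := hmem b (by simp)
      cases t with
      | nil => rw [hb]
      | cons c t' =>
        have hc : c = a := hmem c (by simp)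
        simp [hb, hc] at hnd

-- A's "len(Counter(arr)) == 1" is B's "len(set(arr)) == 1"
theorem counter_size_eq (arr : List Int) :
    (PySem.Dict.counter (κ := Int) arr).size = (PySem.Set.ofList arr).length := by
  have h := congrArg List.length (PySem.Dict.keys_counter (xs := arr))
  simpa [PySem.Dict.keys, PySem.Dict.size] using h

theorem getLastD_append_cons (l : List Int) (q d : Int) (ys : List Int) :
    (l ++ q :: ys).getLastD d = ys.getLastD q := by
  induction l generalizing d with
  | nil => rw [List.nil_append, List.getLastD_cons]
  | cons x xs ih => rw [List.cons_append, List.getLastD_cons, ih]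

-- ===== VERDICT (by name: the statement is the Claim_ definition above) =====
theorem work_spec : Claim_equal_work := by
  intro arr _ hpre
  unfold Spec_work work work_alt
  simp only []
  rw [counter_size_eq]
  cases arr with
  | nil => exact absurd rfl hpre
  | cons a rest =>
    by_cases hone : (PySem.Set.ofList (a :: rest)).length = 1
    · rw [if_pos hone, if_pos hone]
    · rw [if_neg hone, if_neg hone]
      show (match (a :: rest).drop (workFindBreak a rest 1) ++ (a :: rest).take (workFindBreak a rest 1) with
          | [] => (0 : Int)
          | b :: brest => (workGreedy b brest : Int)) =
        ((List.map (fun r => r / 2)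
            (if (a == rest.getLastD a) = true then
              match workRuns a 1 rest with
              | [] => []
              | c :: rs => (c + rs.getLastD 0) :: rs.dropLast
            else workRuns a 1 rest)).sum : Int)
      have hall : ¬ ∀ x ∈ rest, x = a := fun h => hone ((setlen_one_iff a rest).2 h)
      have hj : leadCount a rest < rest.length := leadCount_lt a rest hall
      obtain ⟨q, ys, hdrop, hq⟩ := drop_leadCount a rest hj
      set j := leadCount a rest with hjdef
      have hfb : workFindBreak a rest 1 = 1 + j := findBreak_eq rest a 1
      have hrest : rest = List.replicate j a ++ (q :: ys) := by
        conv_lhs => rw [← List.take_append_drop j rest]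
        rw [take_leadCount, hdrop]
      have hdropA : (a :: rest).drop (1 + j) = q :: ys := by
        rw [show 1 + j = j + 1 from by omega, List.drop_succ_cons, hdrop]
      have htakeA : (a :: rest).take (1 + j) = List.replicate (j + 1) a := by
        rw [show 1 + j = j + 1 from by omega, List.take_succ_cons, take_leadCount,
          ← List.replicate_succ]
      rw [hfb, hdropA, htakeA, List.cons_append]
      show (workGreedy q (ys ++ List.replicate (j + 1) a) : Int) = _
      have hlast : rest.getLastD a = ys.getLastD q := by
        rw [hrest, getLastD_append_cons]
      have hruns : workRuns a 1 rest = (1 + j) :: workRuns q 1 ys := by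
        rw [hrest]; exact runs_replicate_append a q ys hq j 1
      rw [greedy_runs, runs_append_replicate a (j + 1) (by omega), hruns, hlast]
      set R := workRuns q 1 ys with hR
      have hRne : R ≠ [] := workRuns_ne_nil q 1 ys
      by_cases hc : ys.getLastD q = a
      · rw [if_pos hc, if_pos (by rw [beq_iff_eq]; exact hc.symm)]
        show ((sumHalves (bumpLast (j + 1) R) : Nat) : Int) =
          ((sumHalves ((1 + j + R.getLastD 0) :: R.dropLast) : Nat) : Int)
        have he : 1 + j + R.getLastD 0 = R.getLastD 0 + (j + 1) := by omega
        rw [he, bumpLast_eq _ _ hRne]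
        simp [sumHalves]
        omega
      · rw [if_neg hc, if_neg (by simp only [beq_iff_eq]; exact fun hh => hc hh.symm)]
        show ((sumHalves (R ++ [j + 1]) : Nat) : Int) =
          ((sumHalves ((1 + j) :: R) : Nat) : Int)
        rw [sumHalves_append, sumHalves_cons]
        have he : 1 + j = j + 1 := by omega
        rw [he]
        push_cast
        simp [sumHalves]
        omega
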